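-- pv_equiv track=rewrite | github.com/vforvanadium/Cprime-practice-results | load_results.py | calculate_mark
-- ===== SOURCE A (Python) =====
-- from typing import List, Dict
--
-- TOPICS_NUMBER = 6
--
-- def last_occurrence(list_, elem):
--     return len(list_) - 1 - list_[::-1].index(elem)
--
-- def calculate_mark(solved: List[int]) -> int:
--     """Calculates mark from a list of solved"""
--     levels = set()
--     max_levels = []
--     for topic in range(TOPICS_NUMBER):
--         solved_from_topic = solved[topic::TOPICS_NUMBER]
--         if any(solved_from_topic):
--             max_level = last_occurrence(solved_from_topic, 1)
--             max_levels.append(max_level)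
--
--     max_levels.sort(reverse=True)
--     for level in max_levels:
--         while level in levels and level != 0:
--             level -= 1
--         levels.add(level)
--
--     return min(len(levels), len(max_levels))
-- ===== SOURCE B (Python) =====
-- from typing import List
--
-- TOPICS_NUMBER = 6
--
-- def last_occurrence(list_, elem):
--     return len(list_) - 1 - list_[::-1].index(elem)
--
-- def calculate_mark(solved: List[int]) -> int:
--     """Calculates mark from a list of solved"""
--     max_levels = [
--         last_occurrence(s, 1)
--         for topic in range(TOPICS_NUMBER)
--         if any(s := solved[topic::TOPICS_NUMBER])
--     ]
--     mark = 0
--     prev = None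
--     for level in sorted(max_levels, reverse=True):
--         slot = level if prev is None else min(level, prev - 1)
--         if slot < 0:
--             break
--         mark += 1
--         prev = slot
--     return mark
-- ===== Notes on version B (the rewrite author's own statement) =====
-- stated objective: simpler
-- what changed: The set-plus-inner-decrement-while collision resolution is replaced by a single descending scan that keeps only the previously assigned slot (slot = min(level, prev-1), stop when a slot would go negative) and counts assignments directly, eliminating the levels set and the final min().
import Mathlib
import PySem

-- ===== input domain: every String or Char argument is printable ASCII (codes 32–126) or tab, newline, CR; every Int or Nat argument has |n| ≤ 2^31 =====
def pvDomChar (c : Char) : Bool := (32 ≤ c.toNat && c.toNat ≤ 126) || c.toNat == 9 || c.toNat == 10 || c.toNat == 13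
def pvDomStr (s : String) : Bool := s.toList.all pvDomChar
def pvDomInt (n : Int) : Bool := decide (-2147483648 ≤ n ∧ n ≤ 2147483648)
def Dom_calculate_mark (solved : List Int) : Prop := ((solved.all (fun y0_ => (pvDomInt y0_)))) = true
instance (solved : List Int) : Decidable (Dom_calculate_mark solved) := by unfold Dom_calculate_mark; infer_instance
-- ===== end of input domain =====

-- B replaces A's set-plus-inner-decrement-while collision resolution by a single descending
-- scan keeping only the previously assigned slot (objective: simpler second pass, same cost).

-- ===== PORT A =====
-- helper last_occurrence: len(list_) - 1 - list_[::-1].index(elem).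
-- `.index` raises ValueError when elem is absent; that case is outside Pre_, default 0 is unreachable there.
def pv_last_occurrence (l : List Int) (e : Int) : Int :=
  PySem.List.len l - 1 -
    ((PySem.List.index? ((PySem.List.slice? l none none (-1)).getD []) e).getD 0 : Int)

-- the inner `while level in levels and level != 0: level -= 1`; fuel level.toNat + 1 suffices
-- (each pass decrements level by 1 and the loop cannot pass below 0).
def pv_adjust : Nat → PySem.Set Int → Int → Int
  | 0, _, level => level
  | n + 1, lv, level =>
      if level ∈ lv ∧ level ≠ 0 then pv_adjust n lv (level - 1) else level

def calculate_mark (solved : List Int) : Int :=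
  let max_levels : List Int := (List.range 6).foldl (fun acc (topic : Nat) =>
      let s := (PySem.List.slice? solved (some (topic : Int)) none 6).getD []
      if s.any (fun x => decide (x ≠ 0)) then acc ++ [pv_last_occurrence s 1] else acc) []
  let max_levels := PySem.List.sorted max_levels (fun x => x) true   -- max_levels.sort(reverse=True)
  let levels : PySem.Set Int := max_levels.foldl (fun lv level =>
      PySem.Set.add lv (pv_adjust (level.toNat + 1) lv level)) PySem.Set.empty
  min (PySem.List.len levels) (PySem.List.len max_levels)

-- ===== PORT B =====
-- the descending scan with break: prev = None on the first element, afterwards the last slot.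
def pv_count : List Int → Int → Option Int → Int
  | [], mark, _ => mark
  | level :: rest, mark, prev =>
      let slot := match prev with
        | none => level
        | some p => min level (p - 1)
      if slot < 0 then mark else pv_count rest (mark + 1) (some slot)

def calculate_mark_alt (solved : List Int) : Int :=
  let max_levels : List Int := (List.range 6).filterMap (fun (topic : Nat) =>
      let s := (PySem.List.slice? solved (some (topic : Int)) none 6).getD []
      if s.any (fun x => decide (x ≠ 0)) then some (pv_last_occurrence s 1) else none)
  pv_count (PySem.List.sorted max_levels (fun x => x) true) 0 none

-- ===== PRECONDITION & SPEC =====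
-- Pre_ excludes exactly the inputs where some topic slice contains a nonzero entry but no 1:
-- there `list.index(1)` raises ValueError in A (and in B alike).
def Pre_calculate_mark (solved : List Int) : Prop :=
  ∀ topic ∈ List.range 6,
    ((PySem.List.slice? solved (some (topic : Int)) none 6).getD []).any
      (fun x => decide (x ≠ 0)) = true →
    (1 : Int) ∈ (PySem.List.slice? solved (some (topic : Int)) none 6).getD []
instance (solved : List Int) : Decidable (Pre_calculate_mark solved) := by
  unfold Pre_calculate_mark; infer_instance

def pvWitness_calculate_mark : List Int := [1, 1, 1, 1, 1, 1, 0, 1]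

def Spec_calculate_mark (solved : List Int) (out : Int) : Prop := out = calculate_mark_alt solved
instance (solved : List Int) (out : Int) : Decidable (Spec_calculate_mark solved out) := by
  unfold Spec_calculate_mark; infer_instance

-- ===== CLAIM (what is proved, stated in full; the proofs are below) =====
def Claim_equal_calculate_mark : Prop := ∀ (solved : List Int), Dom_calculate_mark solved → Pre_calculate_mark solved → Spec_calculate_mark solved (calculate_mark solved)

-- ===== LEMMAS AND PROOFS =====

-- A's loop over the sorted list, as a named function of the running set (proof-side helper)
def pv_foldA (S : PySem.Set Int) (xs : List Int) : PySem.Set Int :=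
  xs.foldl (fun lv level => PySem.Set.add lv (pv_adjust (level.toNat + 1) lv level)) S

-- B's scan: the accumulator is additive
theorem pv_count_shift (xs : List Int) : ∀ (m : Int) (pr : Option Int),
    pv_count xs m pr = m + pv_count xs 0 pr := by
  induction xs with
  | nil => intro m pr; simp [pv_count]
  | cons v rest ih =>
    intro m pr
    cases pr <;> simp only [pv_count] <;> split_ifs <;>
      first
        | omega
        | (rw [ih (m + 1), ih (0 + 1)]; ring)

-- B's scan counts at most one per element
theorem pv_count_le (xs : List Int) : ∀ (m : Int) (pr : Option Int),
    pv_count xs m pr ≤ m + xs.length := by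
  induction xs with
  | nil => intro m pr; simp [pv_count]
  | cons v rest ih =>
    intro m pr
    cases pr <;> simp only [pv_count, List.length_cons] <;> split_ifs <;>
      first
        | (push_cast; omega)
        | (refine le_trans (ih (m + 1) (some _)) (by push_cast; omega))

-- the inner while loop walks down to 0 when every value in [0, v] is already taken
theorem pv_adjust_stuck : ∀ (n : Nat) (v : Int) (S : PySem.Set Int),
    0 ≤ v → v.toNat < n → (∀ w : Int, 0 ≤ w → w ≤ v → w ∈ S) →
    pv_adjust n S v = 0 := by
  intro n
  induction n with
  | zero => intro v S _ h _; omega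
  | succ n ih =>
    intro v S hv hn hS
    by_cases h0 : v = 0
    · subst h0; simp [pv_adjust]
    · have hmem : v ∈ S := hS v hv le_rfl
      simp only [pv_adjust]
      rw [if_pos (show v ∈ S ∧ v ≠ 0 from ⟨hmem, h0⟩)]
      exact ih (v - 1) S (by omega) (by omega) (fun w hw hw' => hS w hw (by omega))

-- the inner while loop stops at min v (p-1) when S holds [p, v] and nothing below p
theorem pv_adjust_free : ∀ (n : Nat) (v p : Int) (S : PySem.Set Int),
    0 ≤ v → 0 < p → v.toNat < n →
    (∀ w : Int, p ≤ w → w ≤ v → w ∈ S) → (∀ w ∈ S, p ≤ w) →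
    pv_adjust n S v = min v (p - 1) := by
  intro n
  induction n with
  | zero => intro v p S _ _ h _ _; omega
  | succ n ih =>
    intro v p S hv hp hn hIn hLo
    by_cases hpv : p ≤ v
    · have hmem : v ∈ S := hIn v hpv le_rfl
      simp only [pv_adjust]
      rw [if_pos (show v ∈ S ∧ v ≠ 0 from ⟨hmem, by omega⟩)]
      rw [ih (v - 1) p S (by omega) hp (by omega)
          (fun w hw hw' => hIn w hw (by omega)) hLo]
      omega
    · have hnm : v ∉ S := fun h => hpv (hLo v h)
      simp only [pv_adjust]
      rw [if_neg (by tauto)]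
      omega

-- adding an element already in the set leaves it unchanged
theorem pv_set_add_mem (S : PySem.Set Int) (x : Int) (h : x ∈ S) :
    PySem.Set.add S x = S := by
  simp [PySem.Set.add, PySem.Set.contains, h]

-- adding a fresh element appends it
theorem pv_set_add_not_mem (S : PySem.Set Int) (x : Int) (h : x ∉ S) :
    PySem.Set.add S x = S ++ [x] := by
  simp [PySem.Set.add, PySem.Set.contains, h]

-- once the assigned slots have reached 0 the set never grows again
theorem pv_foldA_stuck : ∀ (xs : List Int) (S : PySem.Set Int) (lv : Int),
    (∀ x ∈ xs, 0 ≤ x ∧ x ≤ lv) → (∀ w : Int, 0 ≤ w → w ≤ lv → w ∈ S) →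
    pv_foldA S xs = S := by
  intro xs
  induction xs with
  | nil => intro S lv _ _; rfl
  | cons v rest ih =>
    intro S lv hb hS
    obtain ⟨hv0, hvlv⟩ := hb v (by simp)
    have hadj : pv_adjust (v.toNat + 1) S v = 0 :=
      pv_adjust_stuck (v.toNat + 1) v S hv0 (by omega)
        (fun w hw hw' => hS w hw (by omega))
    show pv_foldA (PySem.Set.add S (pv_adjust (v.toNat + 1) S v)) rest = S
    rw [hadj, pv_set_add_mem S 0 (hS 0 le_rfl (by omega))]
    exact ih S lv (fun x hx => hb x (by simp [hx])) hS

-- MAIN INVARIANT: on a descending list of values in [0, lv], when S holds exactly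
-- every value in [p, lv] (plus elements above lv) and nothing below p, A's set grows
-- by exactly what B's scan counts starting from previous slot p.
theorem pv_loop : ∀ (xs : List Int) (S : PySem.Set Int) (p lv : Int),
    List.Pairwise (fun a b => b ≤ a) xs →
    (∀ x ∈ xs, 0 ≤ x ∧ x ≤ lv) →
    (∀ w : Int, p ≤ w → w ≤ lv → w ∈ S) →
    (∀ w ∈ S, p ≤ w) →
    0 ≤ p →
    ((pv_foldA S xs).length : Int) = (S.length : Int) + pv_count xs 0 (some p) := by
  intro xs
  induction xs with
  | nil => intro S p lv _ _ _ _ _; simp [pv_foldA, pv_count]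
  | cons v rest ih =>
    intro S p lv hpair hb hIn hLo hp0
    obtain ⟨hv0, hvlv⟩ := hb v (by simp)
    rw [List.pairwise_cons] at hpair
    by_cases hp : p = 0
    · subst hp
      rw [pv_foldA_stuck (v :: rest) S lv hb hIn]
      simp only [pv_count]
      rw [if_pos (by omega)]
      simp
    · have hppos : 0 < p := by omega
      have hadj : pv_adjust (v.toNat + 1) S v = min v (p - 1) :=
        pv_adjust_free (v.toNat + 1) v p S hv0 hppos (by omega)
          (fun w hw hw' => hIn w hw (by omega)) hLo
      have hslot0 : 0 ≤ min v (p - 1) := by omega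
      have hnm : min v (p - 1) ∉ S := fun h => by have := hLo _ h; omega
      have hstep : pv_foldA S (v :: rest)
          = pv_foldA (S ++ [min v (p - 1)]) rest := by
        show pv_foldA (PySem.Set.add S (pv_adjust (v.toNat + 1) S v)) rest = _
        rw [hadj, pv_set_add_not_mem S _ hnm]
      have hIH := ih (S ++ [min v (p - 1)]) (min v (p - 1)) v
        hpair.2
        (fun x hx => ⟨(hb x (by simp [hx])).1, hpair.1 x hx⟩)
        (by
          intro w hw hw'
          rcases eq_or_lt_of_le hw with heq | hlt
          · simp [← heq]
          · have hpw : p ≤ w := by omega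
            exact List.mem_append_left _ (hIn w hpw (by omega)))
        (by
          intro w hw
          rcases List.mem_append.mp hw with h | h
          · have := hLo w h; omega
          · simp at h; omega)
        hslot0
      rw [hstep, hIH]
      simp only [pv_count]
      rw [if_neg (by omega), pv_count_shift rest (0 + 1)]
      simp only [List.length_append, List.length_singleton]
      push_cast
      ring

-- the level recorded for a topic is nonnegative when 1 occurs in the slice
theorem pv_last_occurrence_nonneg (s : List Int) (h : (1 : Int) ∈ s) :
    0 ≤ pv_last_occurrence s 1 := by
  have hrev : (1 : Int) ∈ s.reverse := by simpa using h
  obtain ⟨k, hk⟩ := Option.isSome_iff_exists.mp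
    ((PySem.List.index?_isSome_iff s.reverse 1).mpr hrev)
  obtain ⟨pre, suf, hs, hlen, -⟩ := (PySem.List.index?_eq_some_iff _ _ _).mp hk
  have hklt : k < s.length := by
    have hl : s.reverse.length = s.length := by simp
    rw [hs] at hl; simp at hl; omega
  simp only [pv_last_occurrence, PySem.List.slice?_none_none_neg_one, Option.getD_some,
    hk, PySem.List.len_eq]
  omega

-- A's first pass (fold with append) builds the same list as B's comprehension (filterMap)
theorem pv_firstpass_eq {α β : Type} (l : List α) (p : α → Bool) (f : α → β) :
    l.foldl (fun acc x => if p x then acc ++ [f x] else acc) []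
      = l.filterMap (fun x => if p x then some (f x) else none) := by
  rw [PySem.List.foldl_append_if]
  simp only [List.nil_append]
  induction l with
  | nil => simp
  | cons x xs ih => by_cases hx : p x <;> simp [hx, ih]

-- A's whole second pass equals B's scan, for any list of nonnegative levels
theorem pv_second_pass (ml : List Int) (hnn : ∀ x ∈ ml, 0 ≤ x) :
    min (((PySem.List.sorted ml (fun x => x) true).foldl (fun lv level =>
          PySem.Set.add lv (pv_adjust (level.toNat + 1) lv level)) PySem.Set.empty).length : Int)
        ((PySem.List.sorted ml (fun x => x) true).length : Int)
      = pv_count (PySem.List.sorted ml (fun x => x) true) 0 none := by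
  have hnns : ∀ x ∈ PySem.List.sorted ml (fun x => x) true, 0 ≤ x := fun x hx =>
    hnn x ((PySem.List.mem_sorted ml (fun y => y) true x).mp hx)
  have hdesc : List.Pairwise (fun a b => b ≤ a) (PySem.List.sorted ml (fun x => x) true) := by
    have := PySem.List.sorted_pairwise_rev ml (fun x => x)
    simpa using this
  cases hc : PySem.List.sorted ml (fun x => x) true with
  | nil => simp [pv_count, PySem.Set.empty]
  | cons v rest =>
    rw [hc] at hnns hdesc
    rw [List.pairwise_cons] at hdesc
    have hv0 : 0 ≤ v := hnns v (by simp)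
    have hfirst : PySem.Set.add PySem.Set.empty (pv_adjust (v.toNat + 1) PySem.Set.empty v)
        = [v] := by
      have hadj : pv_adjust (v.toNat + 1) PySem.Set.empty v = v := by
        simp [pv_adjust, PySem.Set.empty]
      rw [hadj]
      exact pv_set_add_not_mem [] v (by simp)
    have hloop := pv_loop rest [v] v v hdesc.2
      (fun x hx => ⟨hnns x (by simp [hx]), hdesc.1 x hx⟩)
      (by intro w hw hw'; simp; omega)
      (by intro w hw; simp at hw; omega)
      hv0
    have hA : ((v :: rest).foldl (fun lv level =>
        PySem.Set.add lv (pv_adjust (level.toNat + 1) lv level)) PySem.Set.empty).length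
        = (pv_foldA [v] rest).length := by
      show (pv_foldA (PySem.Set.add PySem.Set.empty
        (pv_adjust (v.toNat + 1) PySem.Set.empty v)) rest).length = _
      rw [hfirst]
    have hB : pv_count (v :: rest) 0 none = 1 + pv_count rest 0 (some v) := by
      simp only [pv_count]
      rw [if_neg (by omega), pv_count_shift rest (0 + 1)]
      ring
    have hle : pv_count rest 0 (some v) ≤ (rest.length : Int) := by
      have := pv_count_le rest 0 (some v)
      omega
    rw [hA, hB]
    simp only [List.length_singleton] at hloop
    rw [hloop]
    simp only [List.length_cons]
    push_cast
    omega

-- ===== VERDICT (by name: the statement is the Claim_ definition above) =====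
theorem calculate_mark_spec : Claim_equal_calculate_mark := by
  intro solved _ hpre
  show calculate_mark solved = calculate_mark_alt solved
  simp only [calculate_mark, calculate_mark_alt, PySem.List.len_eq]
  rw [pv_firstpass_eq]
  apply pv_second_pass
  intro x hx
  obtain ⟨t, ht, hsome⟩ := List.mem_filterMap.mp hx
  by_cases hany : (((PySem.List.slice? solved (some (t : Int)) none 6).getD []).any
      (fun y => decide (y ≠ 0))) = true
  · rw [if_pos hany] at hsome
    exact (Option.some.injEq _ _ ▸ hsome) ▸
      pv_last_occurrence_nonneg _ (hpre t ht hany)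
  · rw [if_neg hany] at hsome
    exact absurd hsome (by simp)
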